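-- pv_equiv track=rewrite | github.com/unabl4/codefights | speeding_for_candy/speeding_for_candy.py | speedingForCandy
-- ===== SOURCE A (Python) =====
-- def speedingForCandy(s,n,k):
--     w = len(s[0])
--     def sp(h):
--         ms = [0] * len(h)
--         ms[0] = h[0]
--         for i in range(1,w):
--             ms[i] = max(h[i], ms[i-1]+h[i])
--
--         r = z = sum(h[:n])
--         for i in range(n,w):
--             z = z+h[i]-h[i-n]
--             r = max(r, z)
--             r = max(r, z+ms[i-n])
--
--         return r
--
--     # ---
--
--     v = [sp(h) for h in s]
--     v = sorted(v,reverse=True)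
--     ms = 0
--     for i in range(k):
--         ms = max(ms, ms+v[i])
--
--     return ms
-- ===== SOURCE B (Python) =====
-- def speedingForCandy(s, n, k):
--     w = len(s[0])
--
--     def sp(h):
--         P = [0]
--         for x in h:
--             P.append(P[-1] + x)
--         r = P[min(n, len(h))]          # sum of the first n entries (clamped slice)
--         mn = P[0]                      # running minimum of P[0..i-n]
--         for i in range(n, w):
--             r = max(r, P[i + 1] - P[i + 1 - n], P[i + 1] - mn)
--             mn = min(mn, P[i - n + 1])
--         return r
--
--     v = sorted((sp(h) for h in s), reverse=True)
--     return sum(max(0, v[i]) for i in range(k))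
-- ===== Notes on version B (the rewrite author's own statement) =====
-- stated objective: simpler
-- what changed: Per row, the Kadane ms[] table plus the separate sliding-window accumulator z are replaced by one prefix-sum array with a lagging running minimum of prefix sums, and the k-step max-accumulation loop is replaced by summing the positive values among the first k sorted scores.
import Mathlib
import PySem

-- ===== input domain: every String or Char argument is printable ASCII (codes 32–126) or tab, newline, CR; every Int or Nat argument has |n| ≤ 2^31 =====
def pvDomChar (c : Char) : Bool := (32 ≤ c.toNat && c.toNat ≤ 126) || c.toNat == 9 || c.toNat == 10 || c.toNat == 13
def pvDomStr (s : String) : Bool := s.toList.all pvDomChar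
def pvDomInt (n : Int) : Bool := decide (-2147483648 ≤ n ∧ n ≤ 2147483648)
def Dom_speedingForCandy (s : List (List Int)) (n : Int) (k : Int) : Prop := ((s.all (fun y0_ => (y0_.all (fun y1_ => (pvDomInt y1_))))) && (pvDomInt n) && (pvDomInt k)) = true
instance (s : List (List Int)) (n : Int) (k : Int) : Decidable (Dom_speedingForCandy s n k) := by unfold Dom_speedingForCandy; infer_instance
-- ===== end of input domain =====

-- B replaces the per-row Kadane table + sliding-window accumulator with one prefix-sum array and a
-- lagging running minimum of prefix sums, and the k-step max accumulation with a sum of the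
-- positive values of the top-k slice (simpler).

def pvGetI (xs : List Int) (i : Int) : Int := PySem.List.pyGetD xs i 0

-- ===== PORT A =====
def spA (w n : Int) (h : List Int) : Int :=
  let ms : List Int := PySem.List.pySetD (List.replicate h.length (0:Int)) 0 (pvGetI h 0)
  let ms : List Int := (PySem.List.pyRange 1 w 1).foldl
    (fun ms i => PySem.List.pySetD ms i (max (pvGetI h i) (pvGetI ms (i-1) + pvGetI h i))) ms
  let z0 : Int := (PySem.List.slice h none (some n)).sum
  let rz := (PySem.List.pyRange n w 1).foldl
    (fun (rz : Int × Int) i =>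
      let z := rz.2 + pvGetI h i - pvGetI h (i-n)
      let r := max rz.1 z
      let r := max r (z + pvGetI ms (i-n))
      (r, z)) (z0, z0)
  rz.1

def speedingForCandy (s : List (List Int)) (n : Int) (k : Int) : Int :=
  let w : Int := ((PySem.List.pyGetD s 0 []).length : Int)
  let v : List Int := s.map (fun h => spA w n h)
  let v : List Int := PySem.List.sorted v (fun x => x) true
  (PySem.List.pyRange 0 k 1).foldl (fun ms i => max ms (ms + pvGetI v i)) 0

-- ===== PORT B =====
def spB (w n : Int) (h : List Int) : Int :=
  let P : List Int := h.foldl (fun P x => P ++ [PySem.List.pyGetD P (-1) 0 + x]) [0]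
  let rm := (PySem.List.pyRange n w 1).foldl
    (fun (rm : Int × Int) i =>
      (max rm.1 (max (pvGetI P (i+1) - pvGetI P (i+1-n)) (pvGetI P (i+1) - rm.2)),
       min rm.2 (pvGetI P (i-n+1))))
    (pvGetI P (min n (h.length : Int)), pvGetI P 0)
  rm.1

def speedingForCandy_alt (s : List (List Int)) (n : Int) (k : Int) : Int :=
  let w : Int := ((PySem.List.pyGetD s 0 []).length : Int)
  let v : List Int := PySem.List.sorted (s.map (fun h => spB w n h)) (fun x => x) true
  (PySem.List.pyRange 0 k 1).foldl (fun acc i => acc + max 0 (pvGetI v i)) 0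

-- ===== PRECONDITION & SPEC =====
-- Pre_ excludes exactly the inputs on which A raises IndexError: an empty grid, an empty first
-- row, a row shorter than the first row, negative n, or k > len(s).
def Pre_speedingForCandy (s : List (List Int)) (n : Int) (k : Int) : Prop :=
  s ≠ [] ∧ 1 ≤ (s.headD []).length ∧ (∀ h ∈ s, (s.headD []).length ≤ h.length) ∧
  0 ≤ n ∧ k ≤ (s.length : Int)
instance (s : List (List Int)) (n : Int) (k : Int) : Decidable (Pre_speedingForCandy s n k) := by
  unfold Pre_speedingForCandy; infer_instance

def pvWitness_speedingForCandy : List (List Int) × Int × Int := ([[1, 2], [3, 4]], 1, 2)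

def Spec_speedingForCandy (s : List (List Int)) (n : Int) (k : Int) (out : Int) : Prop := out = speedingForCandy_alt s n k
instance (s : List (List Int)) (n : Int) (k : Int) (out : Int) : Decidable (Spec_speedingForCandy s n k out) := by unfold Spec_speedingForCandy; infer_instance

-- ===== CLAIM (what is proved, stated in full; the proofs are below) =====
def Claim_equal_speedingForCandy : Prop := ∀ (s : List (List Int)) (n : Int) (k : Int), Dom_speedingForCandy s n k → Pre_speedingForCandy s n k → Spec_speedingForCandy s n k (speedingForCandy s n k)

-- ===== LEMMAS AND PROOFS =====

def pvPref (h : List Int) (j : Nat) : Int := (h.take j).sum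
def pvMnp (h : List Int) : Nat → Int
  | 0 => 0
  | j+1 => min (pvMnp h j) (pvPref h (j+1))
def pvRef (h : List Int) (N : Nat) (z0 : Int) : Nat → Int
  | 0 => z0
  | t+1 => max (max (pvRef h N z0 t) (pvPref h (N+t+1) - pvPref h (t+1)))
               (pvPref h (N+t+1) - pvMnp h t)

lemma pvGetI_nat (xs : List Int) (j : Nat) (hj : j < xs.length) : pvGetI xs (j : Int) = xs[j] := by
  simp [pvGetI, PySem.List.pyGetD_natCast, List.getD_eq_getElem?_getD, List.getElem?_eq_getElem hj]

lemma pvPref_succ (h : List Int) (j : Nat) (hj : j < h.length) :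
    pvPref h (j+1) = pvPref h j + pvGetI h (j : Int) := by
  rw [pvGetI_nat h j hj]
  have ht : h.take (j+1) = h.take j ++ [h[j]] := by
    rw [List.take_add_one]
    simp [List.getElem?_eq_getElem hj]
  rw [pvPref, pvPref, ht, List.sum_append, List.sum_cons, List.sum_nil, add_zero]

lemma pvPref_clamp (h : List Int) (j : Nat) (hj : h.length ≤ j) :
    pvPref h j = pvPref h h.length := by
  simp [pvPref, List.take_of_length_le hj, List.take_of_length_le (le_refl h.length)]

lemma pfold (l : List Int) : ∀ (A : List Int) (c : Int),
    l.foldl (fun P x => P ++ [PySem.List.pyGetD P (-1) 0 + x]) (A ++ [c])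
    = A ++ [c] ++ (List.range l.length).map (fun t => c + (l.take (t+1)).sum) := by
  induction l with
  | nil => intro A c; simp
  | cons x l ih =>
    intro A c
    have hstep : PySem.List.pyGetD (A ++ [c]) (-1) 0 = c :=
      PySem.List.pyGetD_neg_one_append_singleton A c 0
    simp only [List.foldl_cons, hstep]
    rw [ih (A ++ [c]) (c + x)]
    simp only [List.length_cons, List.range_succ_eq_map, List.map_cons, List.map_map, List.take_succ_cons, List.sum_cons]
    simp [List.append_assoc, add_assoc]

lemma P_char (h : List Int) :
    h.foldl (fun P x => P ++ [PySem.List.pyGetD P (-1) 0 + x]) [0]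
    = (0:Int) :: (List.range h.length).map (fun t => pvPref h (t+1)) := by
  have := pfold h [] 0
  simpa [pvPref] using this

lemma P_get (h : List Int) (j : Nat) (hj : j ≤ h.length) :
    pvGetI (h.foldl (fun P x => P ++ [PySem.List.pyGetD P (-1) 0 + x]) [0]) (j : Int)
    = pvPref h j := by
  rw [P_char]
  cases j with
  | zero => simp [pvGetI, pvPref]
  | succ t =>
    have ht : t < h.length := by omega
    rw [pvGetI_nat _ (t+1) (by simpa using ht)]
    simp [List.getElem_map, List.getElem_range]

lemma ms_inv (h : List Int) (w : Int) (hlen : w ≤ (h.length : Int)) :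
    ∀ t : Nat, 1 + (t : Int) ≤ w →
      ((PySem.List.pyRange 1 (1+(t:Int)) 1).foldl
        (fun ms i => PySem.List.pySetD ms i (max (pvGetI h i) (pvGetI ms (i-1) + pvGetI h i)))
        (PySem.List.pySetD (List.replicate h.length (0:Int)) 0 (pvGetI h 0))).length = h.length ∧
      ∀ j : Nat, j < t+1 →
        pvGetI ((PySem.List.pyRange 1 (1+(t:Int)) 1).foldl
          (fun ms i => PySem.List.pySetD ms i (max (pvGetI h i) (pvGetI ms (i-1) + pvGetI h i)))
          (PySem.List.pySetD (List.replicate h.length (0:Int)) 0 (pvGetI h 0))) (j : Int)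
        = pvPref h (j+1) - pvMnp h j := by
  intro t
  induction t with
  | zero =>
    intro hw
    have hl0 : 0 < h.length := by omega
    rw [PySem.List.pyRange_one_eq_nil (by omega)]
    simp only [List.foldl_nil]
    have hset : PySem.List.pySetD (List.replicate h.length (0:Int)) 0 (pvGetI h 0)
        = (List.replicate h.length (0:Int)).set 0 (pvGetI h 0) := by
      simpa using PySem.List.pySetD_natCast (List.replicate h.length (0:Int)) 0 (pvGetI h 0)
    constructor
    · simp [hset]
    · intro j hj
      have hj0 : j = 0 := by omega
      subst hj0
      rw [hset, pvGetI_nat _ 0 (by simpa using hl0)]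
      have h1 := pvPref_succ h 0 hl0
      rw [show ((0:Nat):Int) = (0:Int) by norm_num] at h1
      have h0 : pvPref h 0 = 0 := by simp [pvPref]
      rw [List.getElem_set_self (by simpa using hl0)]
      rw [pvMnp]
      omega
  | succ t ih =>
    intro hw
    have harg : 1 + (t:Int) ≤ w := by push_cast at hw; omega
    have ih' := ih harg
    obtain ⟨ihlen, ihget⟩ := ih'
    have hsplit : PySem.List.pyRange 1 (1+((t+1:Nat):Int)) 1
        = PySem.List.pyRange 1 (1+(t:Int)) 1 ++ [1+(t:Int)] := by
      rw [show (1+((t+1:Nat):Int)) = (1+(t:Int))+1 by push_cast; ring]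
      exact PySem.List.pyRange_one_succ_right (by omega)
    rw [hsplit, List.foldl_append]
    set M := (PySem.List.pyRange 1 (1+(t:Int)) 1).foldl
      (fun ms i => PySem.List.pySetD ms i (max (pvGetI h i) (pvGetI ms (i-1) + pvGetI h i)))
      (PySem.List.pySetD (List.replicate h.length (0:Int)) 0 (pvGetI h 0)) with hM
    simp only [List.foldl_cons, List.foldl_nil]
    have hcast : (1+(t:Int)) = ((t+1:Nat):Int) := by push_cast; ring
    have htlen : t + 1 < h.length := by omega
    have hsetM : PySem.List.pySetD M (1+(t:Int)) (max (pvGetI h (1+(t:Int))) (pvGetI M (1+(t:Int)-1) + pvGetI h (1+(t:Int))))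
        = M.set (t+1) (max (pvGetI h (1+(t:Int))) (pvGetI M (1+(t:Int)-1) + pvGetI h (1+(t:Int)))) := by
      rw [hcast]; exact PySem.List.pySetD_natCast M (t+1) _
    rw [hsetM]
    have hval : max (pvGetI h (1+(t:Int))) (pvGetI M (1+(t:Int)-1) + pvGetI h (1+(t:Int)))
        = pvPref h (t+1+1) - pvMnp h (t+1) := by
      have e1 : (1+(t:Int)) - 1 = ((t:Nat):Int) := by ring
      have hgh : pvGetI h (1+(t:Int)) = pvPref h (t+1+1) - pvPref h (t+1) := by
        rw [hcast, pvGetI_nat h (t+1) htlen]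
        have := pvPref_succ h (t+1) htlen
        rw [pvGetI_nat h (t+1) htlen] at this
        omega
      have hgm : pvGetI M (1+(t:Int)-1) = pvPref h (t+1) - pvMnp h t := by
        rw [e1]; exact ihget t (by omega)
      rw [hgh, hgm, pvMnp]
      omega
    constructor
    · simp [ihlen]
    · intro j hj
      by_cases hje : j = t+1
      · subst hje
        rw [pvGetI_nat _ (t+1) (by simp [ihlen]; omega)]
        rw [List.getElem_set_self (by simp [ihlen]; omega)]
        rw [hval]
      · have hjlt : j < t+1 := by omega
        have hjlen : j < h.length := by omega
        rw [pvGetI_nat _ j (by simp [ihlen]; omega)]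
        rw [List.getElem_set_ne (by omega) (by simp [ihlen]; omega)]
        have := ihget j hjlt
        rw [pvGetI_nat M j (by omega)] at this
        exact this

lemma pvPref_zero (h : List Int) : pvPref h 0 = 0 := by simp [pvPref]

lemma loopA (h : List Int) (n w : Int) (ms : List Int) (hn : 0 ≤ n) (hlen : w ≤ (h.length : Int))
    (hms : ∀ j : Nat, (j:Int) < w → pvGetI ms (j:Int) = pvPref h (j+1) - pvMnp h j) :
    ∀ t : Nat, n + t ≤ w →
      (PySem.List.pyRange n (n+(t:Int)) 1).foldl
        (fun (rz : Int × Int) i =>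
          let z := rz.2 + pvGetI h i - pvGetI h (i-n)
          let r := max rz.1 z
          let r := max r (z + pvGetI ms (i-n))
          (r, z)) (pvPref h n.toNat, pvPref h n.toNat)
      = (pvRef h n.toNat (pvPref h n.toNat) t, pvPref h (n.toNat + t) - pvPref h t) := by
  intro t
  induction t with
  | zero =>
    intro _
    rw [show n + ((0:Nat):Int) = n by norm_num, PySem.List.pyRange_one_eq_nil (le_refl n)]
    simp [pvRef, pvPref_zero]
  | succ t ih =>
    intro hw
    have harg : n + (t:Int) ≤ w := by push_cast at hw; omega
    have hsplit : PySem.List.pyRange n (n+((t+1:Nat):Int)) 1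
        = PySem.List.pyRange n (n+(t:Int)) 1 ++ [n+(t:Int)] := by
      rw [show (n+((t+1:Nat):Int)) = (n+(t:Int))+1 by push_cast; ring]
      exact PySem.List.pyRange_one_succ_right (by omega)
    rw [hsplit, List.foldl_append, ih harg]
    simp only [List.foldl_cons, List.foldl_nil]
    have hNt : n + (t:Int) = ((n.toNat + t : Nat) : Int) := by omega
    have hNtlen : n.toNat + t < h.length := by omega
    have htlen : t < h.length := by omega
    have e1 : n + (t:Int) - n = ((t:Nat):Int) := by ring
    have hgh1 : pvGetI h (n + (t:Int)) = pvPref h (n.toNat + t + 1) - pvPref h (n.toNat + t) := by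
      rw [hNt, pvGetI_nat h _ hNtlen]
      have := pvPref_succ h (n.toNat + t) hNtlen
      rw [pvGetI_nat h _ hNtlen] at this
      omega
    have hgh2 : pvGetI h (n + (t:Int) - n) = pvPref h (t + 1) - pvPref h t := by
      rw [e1, pvGetI_nat h t htlen]
      have := pvPref_succ h t htlen
      rw [pvGetI_nat h t htlen] at this
      omega
    have hgm : pvGetI ms (n + (t:Int) - n) = pvPref h (t+1) - pvMnp h t := by
      rw [e1]; exact hms t (by omega)
    rw [show n.toNat + (t+1) = n.toNat + t + 1 from rfl]
    simp only [hgh1, hgh2, hgm, Prod.mk.injEq]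
    rw [pvRef]
    constructor
    · omega
    · omega

lemma loopB (h : List Int) (n w : Int) (hn : 0 ≤ n) (hlen : w ≤ (h.length : Int)) :
    ∀ t : Nat, n + t ≤ w →
      (PySem.List.pyRange n (n+(t:Int)) 1).foldl
        (fun (rm : Int × Int) i =>
          (max rm.1 (max (pvGetI (h.foldl (fun P x => P ++ [PySem.List.pyGetD P (-1) 0 + x]) [0]) (i+1)
                          - pvGetI (h.foldl (fun P x => P ++ [PySem.List.pyGetD P (-1) 0 + x]) [0]) (i+1-n))
                         (pvGetI (h.foldl (fun P x => P ++ [PySem.List.pyGetD P (-1) 0 + x]) [0]) (i+1) - rm.2)),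
           min rm.2 (pvGetI (h.foldl (fun P x => P ++ [PySem.List.pyGetD P (-1) 0 + x]) [0]) (i-n+1))))
        (pvGetI (h.foldl (fun P x => P ++ [PySem.List.pyGetD P (-1) 0 + x]) [0]) (min n (h.length:Int)),
         pvGetI (h.foldl (fun P x => P ++ [PySem.List.pyGetD P (-1) 0 + x]) [0]) 0)
      = (pvRef h n.toNat (pvPref h n.toNat) t, pvMnp h t) := by
  have hinit1 : pvGetI (h.foldl (fun P x => P ++ [PySem.List.pyGetD P (-1) 0 + x]) [0]) (min n (h.length:Int))
      = pvPref h n.toNat := by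
    rw [show min n (h.length:Int) = ((min n.toNat h.length : Nat) : Int) by omega]
    rw [P_get h _ (by omega)]
    rcases le_total n.toNat h.length with hc | hc
    · rw [Nat.min_eq_left hc]
    · rw [Nat.min_eq_right hc, pvPref_clamp h n.toNat hc]
  have hinit2 : pvGetI (h.foldl (fun P x => P ++ [PySem.List.pyGetD P (-1) 0 + x]) [0]) 0
      = pvMnp h 0 := by
    have := P_get h 0 (by omega)
    rw [show ((0:Nat):Int) = (0:Int) by norm_num] at this
    rw [this, pvMnp, pvPref_zero]
  intro t
  induction t with
  | zero =>
    intro _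
    rw [show n + ((0:Nat):Int) = n by norm_num, PySem.List.pyRange_one_eq_nil (le_refl n)]
    simp only [List.foldl_nil]
    rw [hinit1, hinit2, pvRef]
  | succ t ih =>
    intro hw
    have harg : n + (t:Int) ≤ w := by push_cast at hw; omega
    have hsplit : PySem.List.pyRange n (n+((t+1:Nat):Int)) 1
        = PySem.List.pyRange n (n+(t:Int)) 1 ++ [n+(t:Int)] := by
      rw [show (n+((t+1:Nat):Int)) = (n+(t:Int))+1 by push_cast; ring]
      exact PySem.List.pyRange_one_succ_right (by omega)
    rw [hsplit, List.foldl_append, ih harg]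
    simp only [List.foldl_cons, List.foldl_nil]
    have e2 : n + (t:Int) + 1 = ((n.toNat + t + 1 : Nat) : Int) := by omega
    have e3 : n + (t:Int) + 1 - n = ((t + 1 : Nat) : Int) := by push_cast; ring
    have e4 : n + (t:Int) - n + 1 = ((t + 1 : Nat) : Int) := by push_cast; ring
    rw [e3, e4, e2]
    rw [P_get h (n.toNat + t + 1) (by omega), P_get h (t+1) (by omega)]
    simp only [Prod.mk.injEq]
    constructor
    · rw [pvRef, max_assoc]
    · rw [pvMnp]


lemma sp_eq (w n : Int) (h : List Int) (hw : 1 ≤ w) (hlen : w ≤ (h.length : Int)) (hn : 0 ≤ n) :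
    spA w n h = spB w n h := by
  have hz : (PySem.List.slice h none (some n)).sum = pvPref h n.toNat := by
    rw [PySem.List.slice_to h hn]; rfl
  have hmsI := ms_inv h w hlen (w-1).toNat (by omega)
  rw [show (1:Int) + (((w-1).toNat:Nat):Int) = w by omega] at hmsI
  obtain ⟨hmslen, hmsget⟩ := hmsI
  have hms : ∀ j : Nat, (j:Int) < w → pvGetI ((PySem.List.pyRange 1 w 1).foldl
      (fun ms i => PySem.List.pySetD ms i (max (pvGetI h i) (pvGetI ms (i-1) + pvGetI h i)))
      (PySem.List.pySetD (List.replicate h.length (0:Int)) 0 (pvGetI h 0))) (j:Int)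
      = pvPref h (j+1) - pvMnp h j := fun j hj => hmsget j (by omega)
  have hinit1 : pvGetI (h.foldl (fun P x => P ++ [PySem.List.pyGetD P (-1) 0 + x]) [0]) (min n (h.length:Int))
      = pvPref h n.toNat := by
    rw [show min n (h.length:Int) = ((min n.toNat h.length : Nat) : Int) by omega]
    rw [P_get h _ (by omega)]
    rcases le_total n.toNat h.length with hc | hc
    · rw [Nat.min_eq_left hc]
    · rw [Nat.min_eq_right hc, pvPref_clamp h n.toNat hc]
  rcases le_or_gt n w with hnw | hnw
  · have hA := loopA h n w _ hn hlen hms (w-n).toNat (by omega)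
    have hB := loopB h n w hn hlen (w-n).toNat (by omega)
    rw [show n + ((((w-n).toNat):Nat):Int) = w by omega] at hA hB
    rw [← hz] at hA
    have eA : spA w n h = pvRef h n.toNat ((PySem.List.slice h none (some n)).sum) (w-n).toNat :=
      congrArg Prod.fst hA
    have eB : spB w n h = pvRef h n.toNat (pvPref h n.toNat) (w-n).toNat := congrArg Prod.fst hB
    rw [eA, eB, hz]
  · have hnil : PySem.List.pyRange n w 1 = [] := PySem.List.pyRange_one_eq_nil (by omega)
    have eA : spA w n h = ((PySem.List.pyRange n w 1).foldl
        (fun (rz : Int × Int) i =>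
          let z := rz.2 + pvGetI h i - pvGetI h (i-n)
          let r := max rz.1 z
          let r := max r (z + pvGetI ((PySem.List.pyRange 1 w 1).foldl
            (fun ms i => PySem.List.pySetD ms i (max (pvGetI h i) (pvGetI ms (i-1) + pvGetI h i)))
            (PySem.List.pySetD (List.replicate h.length (0:Int)) 0 (pvGetI h 0))) (i-n))
          (r, z))
        ((PySem.List.slice h none (some n)).sum, (PySem.List.slice h none (some n)).sum)).1 := rfl
    have eB : spB w n h = ((PySem.List.pyRange n w 1).foldl
        (fun (rm : Int × Int) i =>
          (max rm.1 (max (pvGetI (h.foldl (fun P x => P ++ [PySem.List.pyGetD P (-1) 0 + x]) [0]) (i+1)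
                          - pvGetI (h.foldl (fun P x => P ++ [PySem.List.pyGetD P (-1) 0 + x]) [0]) (i+1-n))
                         (pvGetI (h.foldl (fun P x => P ++ [PySem.List.pyGetD P (-1) 0 + x]) [0]) (i+1) - rm.2)),
           min rm.2 (pvGetI (h.foldl (fun P x => P ++ [PySem.List.pyGetD P (-1) 0 + x]) [0]) (i-n+1))))
        (pvGetI (h.foldl (fun P x => P ++ [PySem.List.pyGetD P (-1) 0 + x]) [0]) (min n (h.length:Int)),
         pvGetI (h.foldl (fun P x => P ++ [PySem.List.pyGetD P (-1) 0 + x]) [0]) 0)).1 := rfl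
    rw [eA, eB, hnil]
    simp only [List.foldl_nil]
    rw [hz, hinit1]

-- ===== VERDICT (by name: the statement is the Claim_ definition above) =====
theorem speedingForCandy_spec : Claim_equal_speedingForCandy := by
  intro s n k _ hpre
  obtain ⟨hne, hw1, hrows, hn, hk1⟩ := hpre
  unfold Spec_speedingForCandy
  cases s with
  | nil => exact absurd rfl hne
  | cons h0 s' =>
    simp only [List.headD_cons] at hw1 hrows
    simp only [speedingForCandy, speedingForCandy_alt, PySem.List.pyGetD_zero_cons]
    have hmap : (h0 :: s').map (fun h => spA (h0.length:Int) n h)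
        = (h0 :: s').map (fun h => spB (h0.length:Int) n h) := by
      apply List.map_congr_left
      intro h hh
      exact sp_eq (h0.length:Int) n h (by exact_mod_cast hw1) (by exact_mod_cast hrows h hh) hn
    rw [hmap]
    apply List.foldl_ext
    intro a i _
    omega
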